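-- pv_equiv track=rewrite | github.com/loganfernandes/bootdevstaticsite | src/blocktype.py | is_heading
-- ===== SOURCE A (Python) =====
-- def is_heading(lines):
--     count = 0
--     if len(lines) != 1:
--         return False
--     block = lines[0]
--     for char in block:
--         if char == "#":
--             count += 1
--         else:
--             break
--     if 1 <= count <= 6 and count < len(block):
--         return block[count] == " "
--     return False
-- ===== SOURCE B (Python) =====
-- def is_heading(lines):
--     if len(lines) != 1:
--         return False
--     block = lines[0]
--     return any(block.startswith("#" * n + " ") for n in range(1, 7))
-- ===== Notes on version B (the rewrite author's own statement) =====
-- stated objective: idiomatic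
-- what changed: Replaces the manual counting loop over characters plus bound/index checks with a single any() over the six possible heading prefixes '# ' .. '###### ' tested with str.startswith.
import Mathlib
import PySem

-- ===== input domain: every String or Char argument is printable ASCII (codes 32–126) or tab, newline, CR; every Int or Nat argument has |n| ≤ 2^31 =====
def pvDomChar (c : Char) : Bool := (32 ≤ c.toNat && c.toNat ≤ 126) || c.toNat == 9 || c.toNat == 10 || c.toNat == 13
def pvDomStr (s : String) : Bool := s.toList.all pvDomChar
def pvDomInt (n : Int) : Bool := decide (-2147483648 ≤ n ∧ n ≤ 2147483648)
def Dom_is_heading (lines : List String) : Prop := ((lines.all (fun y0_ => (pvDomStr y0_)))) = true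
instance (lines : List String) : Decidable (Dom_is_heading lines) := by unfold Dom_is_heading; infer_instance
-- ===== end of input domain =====

-- B replaces A's character-counting loop with six startswith prefix tests (idiomatic rewrite); proved equal on all inputs.


-- ===== PORT A =====
-- the 'for char in block: if '#': count += 1 else break' loop
def pvLeadHash : List Char → Nat
  | [] => 0
  | c :: cs => if c = '#' then pvLeadHash cs + 1 else 0

def is_heading (lines : List String) : Bool :=
  if lines.length ≠ 1 then false
  else
    let cs := (lines.headD "").toList
    let count := pvLeadHash cs
    if 1 ≤ count ∧ count ≤ 6 ∧ count < cs.length then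
      cs[count]? == some ' '
    else false

-- ===== PORT B =====
def is_heading_alt (lines : List String) : Bool :=
  if lines.length ≠ 1 then false
  else
    let block := lines.headD ""
    (PySem.List.pyRange 1 7 1).any (fun n =>
      PySem.Str.startswith block (String.ofList (List.replicate n.toNat '#' ++ [' '])))

-- ===== PRECONDITION & SPEC =====
def Spec_is_heading (lines : List String) (out : Bool) : Prop := out = is_heading_alt lines
instance (lines : List String) (out : Bool) : Decidable (Spec_is_heading lines out) := by unfold Spec_is_heading; infer_instance

-- ===== CLAIM (what is proved, stated in full; the proofs are below) =====
def Claim_equal_is_heading : Prop := ∀ (lines : List String), Dom_is_heading lines → Spec_is_heading lines (is_heading lines)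

-- ===== LEMMAS AND PROOFS =====

-- the key characterisation: "#"*n ++ " " is a prefix of cs iff the leading-hash count is exactly n and cs[n] = ' '
theorem pvPrefix_iff (n : Nat) (cs : List Char) :
    (List.replicate n '#' ++ [' ']) <+: cs ↔ (pvLeadHash cs = n ∧ cs[n]? = some ' ') := by
  induction n generalizing cs with
  | zero =>
    cases cs with
    | nil => simp [pvLeadHash]
    | cons c rest =>
      simp only [List.replicate, List.nil_append, pvLeadHash]
      constructor
      · rintro ⟨t, ht⟩
        cases ht
        simp
      · rintro ⟨h1, h2⟩
        simp only [List.getElem?_cons_zero, Option.some.injEq] at h2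
        subst h2
        exact ⟨rest, rfl⟩
  | succ n ih =>
    cases cs with
    | nil =>
      constructor
      · rintro ⟨t, ht⟩; simp at ht
      · rintro ⟨h1, h2⟩; simp at h2
    | cons c rest =>
      constructor
      · rintro ⟨t, ht⟩
        simp only [List.replicate_succ, List.cons_append, List.cons.injEq] at ht
        obtain ⟨hc, hrest⟩ := ht
        have := (ih rest).mp ⟨t, hrest⟩
        subst hc
        simp [pvLeadHash, this.1, this.2]
      · rintro ⟨h1, h2⟩
        by_cases hc : c = '#'
        · subst hc
          have h1' : pvLeadHash rest = n := by simpa [pvLeadHash] using h1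
          simp only [List.getElem?_cons_succ] at h2
          obtain ⟨t, ht⟩ := (ih rest).mpr ⟨h1', h2⟩
          exact ⟨t, by simp [List.replicate_succ, ht]⟩
        · simp [pvLeadHash, hc] at h1

theorem is_heading_eq_alt (lines : List String) : is_heading lines = is_heading_alt lines := by
  unfold is_heading is_heading_alt
  by_cases hl : lines.length ≠ 1
  · simp [hl]
  · simp only [hl, if_false]
    have hrange : PySem.List.pyRange 1 7 1 = [1, 2, 3, 4, 5, 6] := by decide
    rw [hrange]
    set cs := (lines.headD "").toList with hcs
    have hsw : ∀ n : Nat,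
        (PySem.Str.startswith (lines.headD "") (String.ofList (List.replicate n '#' ++ [' '])) = true)
        ↔ (pvLeadHash cs = n ∧ cs[n]? = some ' ') := by
      intro n
      rw [PySem.Str.startswith_eq,
        show (String.ofList (List.replicate n '#' ++ [' '])).toList = List.replicate n '#' ++ [' ']
          from by simp,
        PySem.Chars.startswith_iff, pvPrefix_iff, hcs]
    rw [Bool.eq_iff_iff]
    simp only [List.any_cons, List.any_nil, Bool.or_eq_true, Bool.false_eq_true, or_false,
      show ((1:Int)).toNat = 1 from by simp, show ((2:Int)).toNat = 2 from by simp,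
      show ((3:Int)).toNat = 3 from by simp, show ((4:Int)).toNat = 4 from by simp,
      show ((5:Int)).toNat = 5 from by simp, show ((6:Int)).toNat = 6 from by simp, hsw]
    have fin : ∀ n : Nat, 1 ≤ n → n ≤ 6 → pvLeadHash cs = n → cs[n]? = some ' ' →
        (if 1 ≤ pvLeadHash cs ∧ pvLeadHash cs ≤ 6 ∧ pvLeadHash cs < cs.length then
          cs[pvLeadHash cs]? == some ' ' else false) = true := by
      intro n h1 h6 he hs
      have hlen : n < cs.length := (List.getElem?_eq_some_iff.mp hs).1
      rw [he, if_pos ⟨h1, h6, hlen⟩]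
      simp [hs]
    constructor
    · intro h
      split_ifs at h with hc
      · obtain ⟨h1, h6, hlt⟩ := hc
        rw [beq_iff_eq] at h
        set k := pvLeadHash cs with hk
        interval_cases k <;> simp [h]
    · intro h
      rcases h with h | h | h | h | h | h <;>
        exact fin _ (by norm_num) (by norm_num) h.1 h.2

-- ===== VERDICT (by name: the statement is the Claim_ definition above) =====
theorem is_heading_spec : Claim_equal_is_heading := by
  intro lines _
  exact is_heading_eq_alt lines
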